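-- pv_equiv track=rewrite | github.com/Artgelika/Small-projects | CodeWars.py | parse_IPv6
-- ===== SOURCE A (Python) =====
-- def parse_IPv6(iPv6):
--     tik = iPv6[4]
--     list_split = iPv6.split(tik)
--     list_of_list = []
--     for element in list_split:
--         temp = []
--         for el in element:
--             temp.append(int(el, 16))
--         list_of_list.extend([temp])
--
--     list_of_list = [sum(elem) for elem in list_of_list]
--     sum_ = ""
--     for el in list_of_list:
--         sum_ += str(el)
--     return sum_
-- ===== SOURCE B (Python) =====
-- def parse_IPv6(iPv6):
--     # single fused pass: running per-group sum, flush on delimiter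
--     delim = iPv6[4]
--     acc = 0
--     parts = []
--     for ch in iPv6:
--         if ch == delim:
--             parts.append(str(acc))
--             acc = 0
--         else:
--             acc += int(ch, 16)
--     parts.append(str(acc))
--     return "".join(parts)
-- ===== Notes on version B (the rewrite author's own statement) =====
-- stated objective: simpler
-- what changed: replaces split + nested list-of-lists build + sum map + repeated string concatenation with one fused pass over the characters keeping a running group sum flushed at each delimiter
import Mathlib
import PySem

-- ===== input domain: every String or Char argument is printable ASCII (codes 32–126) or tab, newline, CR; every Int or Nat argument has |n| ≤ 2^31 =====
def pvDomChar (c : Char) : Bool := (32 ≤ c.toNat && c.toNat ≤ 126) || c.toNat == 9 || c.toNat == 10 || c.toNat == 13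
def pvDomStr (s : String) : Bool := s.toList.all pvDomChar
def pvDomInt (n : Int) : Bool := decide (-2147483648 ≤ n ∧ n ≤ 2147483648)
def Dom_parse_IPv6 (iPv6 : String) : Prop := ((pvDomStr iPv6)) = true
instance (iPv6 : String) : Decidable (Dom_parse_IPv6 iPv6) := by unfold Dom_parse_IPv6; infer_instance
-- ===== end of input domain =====

-- B replaces A's split + nested list build + sum map + concatenation by one fused pass
-- with a running group sum flushed at each delimiter (same O(n) cost, simpler).

-- int(el, 16) on a one-character string; `none` = ValueError, excluded by Pre_
def pvHex (c : Char) : Int := (PySem.Int.ofCharsBase? [c] 16).getD 0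

-- ===== PORT A =====
def parse_IPv6 (iPv6 : String) : String :=
  match PySem.Str.pyGet? iPv6 4 with                 -- tik = iPv6[4]; none = IndexError, excluded by Pre_
  | none => ""
  | some tik =>
    let list_split := PySem.Chars.splitOn iPv6.toList [tik]   -- iPv6.split(tik); sep is one char so nonempty
    let list_of_list := list_split.foldl (fun acc element =>
      acc ++ [element.foldl (fun temp el => temp ++ [pvHex el]) []]) []
    let sums := list_of_list.map (fun elem => elem.foldl (· + ·) 0)   -- [sum(elem) for elem in …]
    String.ofList (sums.foldl (fun s el => s ++ PySem.Int.toChars el) [])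

-- ===== PORT B =====
def parse_IPv6_alt (iPv6 : String) : String :=
  match PySem.Str.pyGet? iPv6 4 with                 -- delim = iPv6[4]; none = IndexError, excluded by Pre_
  | none => ""
  | some delim =>
    let st := iPv6.toList.foldl (fun (st : Int × List (List Char)) ch =>
      if ch == delim then (0, st.2 ++ [PySem.Int.toChars st.1])
      else (st.1 + pvHex ch, st.2)) (0, [])
    String.ofList (PySem.Chars.join [] (st.2 ++ [PySem.Int.toChars st.1]))   -- "".join(parts + [str(acc)])

-- ===== PRECONDITION & SPEC =====
-- a hexadecimal digit: exactly the single characters int(·, 16) accepts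
def pvIsHex (c : Char) : Bool := c.isDigit || ('a' ≤ c && c ≤ 'f') || ('A' ≤ c && c ≤ 'F')

-- Pre_: exactly the inputs where Python A returns: length ≥ 5 (else iPv6[4] is an
-- IndexError) and every character other than the delimiter iPv6[4] is a hex digit
-- (else int(·, 16) is a ValueError).
def Pre_parse_IPv6 (iPv6 : String) : Prop :=
  5 ≤ iPv6.toList.length ∧
  (iPv6.toList.all fun c => c == iPv6.toList.getD 4 ' ' || pvIsHex c) = true
instance (iPv6 : String) : Decidable (Pre_parse_IPv6 iPv6) := by unfold Pre_parse_IPv6; infer_instance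

def pvWitness_parse_IPv6 : String := "2001:0db8"

def Spec_parse_IPv6 (iPv6 : String) (out : String) : Prop := out = parse_IPv6_alt iPv6
instance (iPv6 : String) (out : String) : Decidable (Spec_parse_IPv6 iPv6 out) := by unfold Spec_parse_IPv6; infer_instance

-- ===== CLAIM (what is proved, stated in full; the proofs are below) =====
def Claim_equal_parse_IPv6 : Prop := ∀ (iPv6 : String), Dom_parse_IPv6 iPv6 → Pre_parse_IPv6 iPv6 → Spec_parse_IPv6 iPv6 (parse_IPv6 iPv6)

-- ===== LEMMAS AND PROOFS =====

-- structural description of splitting on one character: first group and remaining groups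
def pvSplitD (d : Char) : List Char → List Char × List (List Char)
  | [] => ([], [])
  | c :: cs =>
    let p := pvSplitD d cs
    if c = d then ([], p.1 :: p.2) else (c :: p.1, p.2)

lemma pv_go_spec (d : Char) : ∀ (fuel : Nat) (l cur : List Char) (acc : List (List Char)),
    l.length < fuel →
    PySem.Chars.splitOn.go [d] fuel l cur acc =
      acc.reverse ++ (cur.reverse ++ (pvSplitD d l).1) :: (pvSplitD d l).2 := by
  intro fuel
  induction fuel with
  | zero => intro l cur acc h; omega
  | succ f ih =>
    intro l cur acc h
    match l with
    | [] => simp [PySem.Chars.splitOn.go, pvSplitD]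
    | c :: rest =>
      rw [PySem.Chars.splitOn.go]
      by_cases hc : c = d
      · subst hc
        have hp : List.isPrefixOf [c] (c :: rest) = true := by
          simp [List.isPrefixOf]
        rw [if_pos hp]
        have hdrop : List.drop [c].length (c :: rest) = rest := rfl
        rw [hdrop, ih rest [] (cur.reverse :: acc) (by simpa using Nat.lt_of_succ_lt_succ h)]
        simp [pvSplitD]
      · have hp : List.isPrefixOf [d] (c :: rest) = false := by
          simp [List.isPrefixOf]; intro hh; exact absurd hh.symm hc
        rw [if_neg (by simp [hp])]
        rw [ih rest (c :: cur) acc (by simpa using Nat.lt_of_succ_lt_succ h)]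
        simp [pvSplitD, if_neg hc]

lemma pv_splitOn_single (d : Char) (cs : List Char) :
    PySem.Chars.splitOn cs [d] = (pvSplitD d cs).1 :: (pvSplitD d cs).2 := by
  unfold PySem.Chars.splitOn
  rw [pv_go_spec d (cs.length + 1) cs [] [] (by omega)]
  simp

lemma pv_join_nil_flatten : ∀ (xs : List (List Char)), PySem.Chars.join [] xs = xs.flatten := by
  intro xs
  match xs with
  | [] => simp [PySem.Chars.join_nil]
  | [p] => simp [PySem.Chars.join_singleton]
  | p :: q :: rest =>
    rw [PySem.Chars.join_cons_cons]
    rw [pv_join_nil_flatten (q :: rest)]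
    simp

-- sum of a group's hex values
def pvGsum (g : List Char) : Int := (g.map pvHex).sum

lemma pv_B_inv (d : Char) : ∀ (cs : List Char) (acc : Int) (parts : List (List Char)),
    ((cs.foldl (fun (st : Int × List (List Char)) ch =>
        if ch = d then (0, st.2 ++ [PySem.Int.toChars st.1])
        else (st.1 + pvHex ch, st.2)) (acc, parts)).2
      ++ [PySem.Int.toChars (cs.foldl (fun (st : Int × List (List Char)) ch =>
        if ch = d then (0, st.2 ++ [PySem.Int.toChars st.1])
        else (st.1 + pvHex ch, st.2)) (acc, parts)).1]).flatten
    = parts.flatten ++ PySem.Int.toChars (acc + pvGsum (pvSplitD d cs).1)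
        ++ ((pvSplitD d cs).2.map (fun g => PySem.Int.toChars (pvGsum g))).flatten := by
  intro cs
  induction cs with
  | nil => intro acc parts; simp [pvSplitD, pvGsum]
  | cons c cs ih =>
    intro acc parts
    by_cases hc : c = d
    · subst hc
      simp only [List.foldl, if_true]
      rw [ih 0 (parts ++ [PySem.Int.toChars acc])]
      simp [pvSplitD, pvGsum]
    · simp only [List.foldl, if_neg hc]
      rw [ih (acc + pvHex c) parts]
      simp [pvSplitD, if_neg hc, pvGsum, add_assoc]

-- ===== VERDICT (by name: the statement is the Claim_ definition above) =====
theorem parse_IPv6_spec : Claim_equal_parse_IPv6 := by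
  intro iPv6 _ _
  unfold Spec_parse_IPv6 parse_IPv6 parse_IPv6_alt
  cases h : PySem.Str.pyGet? iPv6 4 with
  | none => rfl
  | some tik =>
    simp only
    congr 1
    rw [pv_splitOn_single, pv_join_nil_flatten]
    simp only [beq_iff_eq]
    rw [pv_B_inv tik iPv6.toList 0 []]
    have hinner : ∀ g : List Char,
        g.foldl (fun temp el => temp ++ [pvHex el]) [] = g.map pvHex := by
      intro g
      simpa using PySem.List.foldl_append_singleton_eq_map (l := g) (f := pvHex) (acc := [])
    have hsum : ∀ g : List Char,
        (g.map pvHex).foldl (· + ·) 0 = pvGsum g := by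
      intro g
      simpa [pvGsum] using PySem.List.foldl_add (g.map pvHex) id 0
    simp [hinner, hsum, Function.comp_def]
    induction (pvSplitD tik iPv6.toList).2 with
    | nil => simp
    | cons g gs ih2 => simp [ih2]
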